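-- pv_equiv track=rewrite | github.com/YeSylvie/algojour1-Ye | matrice/matrice.py | create_matrice_carre
-- ===== SOURCE A (Python) =====
-- def create_matrice_carre(col_size, line_size, asci_codes):
--     matrice = []
--     liste = []
--     element = 0
--     for i in range(line_size):
--         liste = []
--         j = 0
--         for j in range(col_size):
--             if element >= len(asci_codes):
--                 liste.append(0)
--             else:
--                 liste.append(asci_codes[element])
--                 element += 1
--         matrice.append(liste)
--     return matrice
-- ===== SOURCE B (Python) =====
-- def create_matrice_carre(col_size, line_size, asci_codes):
--     rows = max(line_size, 0)
--     cols = max(col_size, 0)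
--     total = rows * cols
--     flat = list(asci_codes[:total])
--     flat += [0] * (total - len(flat))
--     return [flat[r * cols:(r + 1) * cols] for r in range(rows)]
-- ===== Notes on version B (the rewrite author's own statement) =====
-- stated objective: simpler
-- what changed: Replaces the nested loops with a per-element counter and zero/copy branch by building one flat buffer (codes truncated to rows*cols, padded with zeros) and reshaping it with slices.
import Mathlib
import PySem

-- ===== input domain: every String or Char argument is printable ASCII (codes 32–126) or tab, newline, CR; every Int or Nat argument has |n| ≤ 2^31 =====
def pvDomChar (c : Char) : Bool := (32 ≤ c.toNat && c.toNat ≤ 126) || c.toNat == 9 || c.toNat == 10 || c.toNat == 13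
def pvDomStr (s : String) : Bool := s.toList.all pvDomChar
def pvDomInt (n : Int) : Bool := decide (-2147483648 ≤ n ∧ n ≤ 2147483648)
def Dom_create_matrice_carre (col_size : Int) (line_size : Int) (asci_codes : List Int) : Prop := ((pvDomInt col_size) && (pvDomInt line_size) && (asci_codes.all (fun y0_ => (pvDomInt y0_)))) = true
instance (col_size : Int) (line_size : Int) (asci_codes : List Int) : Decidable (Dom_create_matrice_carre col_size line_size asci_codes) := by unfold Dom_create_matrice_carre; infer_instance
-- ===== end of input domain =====

-- B builds one flat zero-padded buffer and reshapes it by slicing, instead of A's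
-- nested loops with a per-element counter and a zero/copy branch; same cost, simpler.

-- ===== PORT A =====
def create_matrice_carre (col_size : Int) (line_size : Int) (asci_codes : List Int) : List (List Int) :=
  -- matrice = []; element = 0; for i in range(line_size): build liste over range(col_size)
  let res := (PySem.List.pyRange 0 line_size 1).foldl
    (fun (st : List (List Int) × Int) _i =>
      let inner := (PySem.List.pyRange 0 col_size 1).foldl
        (fun (st2 : List Int × Int) _j =>
          if st2.2 ≥ PySem.List.len asci_codes then (st2.1 ++ [(0 : Int)], st2.2)
          else (st2.1 ++ [PySem.List.pyGetD asci_codes st2.2 0], st2.2 + 1))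
        ([], st.2)
      (st.1 ++ [inner.1], inner.2))
    ([], 0)
  res.1

-- ===== PORT B =====
def create_matrice_carre_alt (col_size : Int) (line_size : Int) (asci_codes : List Int) : List (List Int) :=
  let rows := max line_size 0
  let cols := max col_size 0
  let total := rows * cols
  let cut := PySem.List.slice asci_codes none (some total)          -- asci_codes[:total]
  let flat := cut ++ List.replicate (total.toNat - cut.length) 0     -- flat += [0]*(total-len(flat))
  (PySem.List.pyRange 0 rows 1).map
    (fun r => PySem.List.slice flat (some (r * cols)) (some ((r + 1) * cols)))

-- ===== PRECONDITION & SPEC =====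
def Spec_create_matrice_carre (col_size : Int) (line_size : Int) (asci_codes : List Int) (out : List (List Int)) : Prop := out = create_matrice_carre_alt col_size line_size asci_codes
instance (col_size : Int) (line_size : Int) (asci_codes : List Int) (out : List (List Int)) : Decidable (Spec_create_matrice_carre col_size line_size asci_codes out) := by unfold Spec_create_matrice_carre; infer_instance

-- ===== CLAIM (what is proved, stated in full; the proofs are below) =====
def Claim_equal_create_matrice_carre : Prop := ∀ (col_size : Int) (line_size : Int) (asci_codes : List Int), Dom_create_matrice_carre col_size line_size asci_codes → Spec_create_matrice_carre col_size line_size asci_codes (create_matrice_carre col_size line_size asci_codes)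

-- ===== LEMMAS AND PROOFS =====

-- a fold whose body ignores the list element is an iterate
theorem pv_foldl_iterate {α β : Type} (g : α → α) (l : List β) (init : α) :
    l.foldl (fun st _ => g st) init = g^[l.length] init := by
  induction l generalizing init with
  | nil => rfl
  | cons x t ih => simp [List.foldl_cons, ih, Function.iterate_succ_apply]

-- row of width c read from codes starting at index a, zero-padded
def pvRow (codes : List Int) (c a : Nat) : List Int :=
  (List.range c).map (fun i => codes.getD (a + i) 0)

theorem pvRow_of_len_le (codes : List Int) (c : Nat) {a b : Nat}
    (ha : codes.length ≤ a) (hb : codes.length ≤ b) : pvRow codes c a = pvRow codes c b := by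
  unfold pvRow
  refine List.map_congr_left (fun i _ => ?_)
  rw [List.getD_eq_default _ _ (by omega), List.getD_eq_default _ _ (by omega)]

def pvG (codes : List Int) : List Int × Int → List Int × Int := fun st2 =>
  if st2.2 ≥ PySem.List.len codes then (st2.1 ++ [(0 : Int)], st2.2)
  else (st2.1 ++ [PySem.List.pyGetD codes st2.2 0], st2.2 + 1)

theorem pv_inner (codes : List Int) : ∀ (c : Nat) (acc : List Int) (e : Nat),
    e ≤ codes.length →
    (pvG codes)^[c] (acc, (e : Int)) =
      (acc ++ pvRow codes c e, ((min (e + c) codes.length : Nat) : Int)) := by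
  intro c
  induction c with
  | zero => intro acc e he; simp [pvRow]; omega
  | succ c ih =>
    intro acc e he
    rw [Function.iterate_succ_apply]
    by_cases h : codes.length ≤ e
    · have he' : e = codes.length := le_antisymm he h
      have hg : pvG codes (acc, (e : Int)) = (acc ++ [(0 : Int)], (e : Int)) := by
        simp [pvG, PySem.List.len_eq]; omega
      rw [hg, ih (acc ++ [(0 : Int)]) e he]
      simp only [Prod.mk.injEq]
      constructor
      · have : pvRow codes (c + 1) e = 0 :: pvRow codes c e := by
          unfold pvRow
          rw [List.range_succ_eq_map]
          simp only [List.map_cons, List.map_map]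
          rw [List.getD_eq_default _ _ (by omega)]
          congr 1
          refine List.map_congr_left (fun i _ => ?_)
          simp only [Function.comp_apply]
          rw [List.getD_eq_default _ _ (by omega), List.getD_eq_default _ _ (by omega)]
        simp [this]
      · congr 1; omega
    · push_neg at h
      have hg : pvG codes (acc, (e : Int)) =
          (acc ++ [codes.getD e 0], ((e + 1 : Nat) : Int)) := by
        simp only [pvG, PySem.List.len_eq]
        rw [if_neg (by push_cast; omega)]
        rw [PySem.List.pyGetD_natCast]
        simp only [Prod.mk.injEq]
        exact ⟨by simp, by push_cast; ring⟩
      rw [hg, ih _ (e + 1) (by omega)]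
      simp only [Prod.mk.injEq]
      constructor
      · have : pvRow codes (c + 1) e = codes.getD e 0 :: pvRow codes c (e + 1) := by
          unfold pvRow
          rw [List.range_succ_eq_map]
          simp only [List.map_cons, List.map_map, Nat.add_zero]
          congr 1
          refine List.map_congr_left (fun i _ => ?_)
          simp only [Function.comp_apply]
          congr 1
          omega
        simp [this]
      · congr 1; omega

def pvH (codes : List Int) (c : Nat) : List (List Int) × Int → List (List Int) × Int := fun st =>
  let inner := (pvG codes)^[c] ([], st.2)
  (st.1 ++ [inner.1], inner.2)

theorem pv_outer (codes : List Int) (c : Nat) : ∀ (k : Nat) (mat : List (List Int)) (e : Nat),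
    e ≤ codes.length →
    (pvH codes c)^[k] (mat, (e : Int)) =
      (mat ++ (List.range k).map (fun r => pvRow codes c (e + r * c)),
        ((min (e + k * c) codes.length : Nat) : Int)) := by
  intro k
  induction k with
  | zero => intro mat e he; simp; omega
  | succ k ih =>
    intro mat e he
    rw [Function.iterate_succ_apply]
    have hH : pvH codes c (mat, (e : Int)) =
        (mat ++ [pvRow codes c e], ((min (e + c) codes.length : Nat) : Int)) := by
      unfold pvH
      rw [pv_inner codes c [] e he]
      simp
    rw [hH, ih _ (min (e + c) codes.length) (by omega)]
    simp only [Prod.mk.injEq]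
    refine ⟨?_, by congr 1; rw [Nat.succ_mul]; omega⟩
    rw [List.range_succ_eq_map]
    simp only [List.map_cons, List.map_map, List.append_assoc, List.singleton_append]
    congr 2
    · congr 1; omega
    · refine List.map_congr_left (fun r _ => ?_)
      simp only [Function.comp]
      by_cases hle : e + c ≤ codes.length
      · congr 1; rw [Nat.succ_mul]; omega
      · exact pvRow_of_len_le codes c (by omega) (by push_neg at hle; calc
          codes.length ≤ e + c := by omega
          _ ≤ e + Nat.succ r * c := by rw [Nat.succ_mul]; omega)

-- A computed in closed form
theorem pv_A_eq (col_size line_size : Int) (codes : List Int) :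
    create_matrice_carre col_size line_size codes =
      (List.range line_size.toNat).map (fun r => pvRow codes col_size.toNat (r * col_size.toNat)) := by
  unfold create_matrice_carre
  have h1 : ∀ (st : List (List Int) × Int),
      (PySem.List.pyRange 0 col_size 1).foldl
        (fun (st2 : List Int × Int) _j =>
          if st2.2 ≥ PySem.List.len codes then (st2.1 ++ [(0 : Int)], st2.2)
          else (st2.1 ++ [PySem.List.pyGetD codes st2.2 0], st2.2 + 1))
        ([], st.2) = (pvG codes)^[col_size.toNat] ([], st.2) := by
    intro st
    have hbody : (fun (st2 : List Int × Int) (_j : Int) =>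
        if st2.2 ≥ PySem.List.len codes then (st2.1 ++ [(0 : Int)], st2.2)
        else (st2.1 ++ [PySem.List.pyGetD codes st2.2 0], st2.2 + 1))
        = fun st2 _ => pvG codes st2 := rfl
    rw [hbody, pv_foldl_iterate (pvG codes)]
    congr 1
    rw [PySem.List.length_pyRange_one]; omega
  have h2 : (PySem.List.pyRange 0 line_size 1).foldl
      (fun (st : List (List Int) × Int) _i =>
        let inner := (PySem.List.pyRange 0 col_size 1).foldl
          (fun (st2 : List Int × Int) _j =>
            if st2.2 ≥ PySem.List.len codes then (st2.1 ++ [(0 : Int)], st2.2)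
            else (st2.1 ++ [PySem.List.pyGetD codes st2.2 0], st2.2 + 1))
          ([], st.2)
        (st.1 ++ [inner.1], inner.2))
      ([], 0) = (pvH codes col_size.toNat)^[line_size.toNat] ([], 0) := by
    rw [pv_foldl_iterate]
    · congr 1
      · funext st
        simp only [pvH]
        rw [h1 st]
      · rw [PySem.List.length_pyRange_one]; omega
  simp only [h2]
  have := pv_outer codes col_size.toNat line_size.toNat [] 0 (by omega)
  simp only [Nat.cast_zero] at this
  rw [this]
  simp

-- the flat buffer of B agrees with codes.getD below total
theorem pv_flat_getD (codes : List Int) (total : Nat) (j : Nat) (hj : j < total) :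
    (PySem.List.slice codes none (some (total : Int)) ++
      List.replicate (total - (PySem.List.slice codes none (some (total : Int))).length) (0 : Int)).getD j 0
      = codes.getD j 0 := by
  rw [PySem.List.slice_to_natCast]
  by_cases h : j < codes.length
  · rw [List.getD_eq_getElem?_getD, List.getElem?_append_left (by
      simp [List.length_take]; omega)]
    rw [List.getElem?_take_of_lt hj]
    rw [← List.getD_eq_getElem?_getD]
  · push_neg at h
    rw [List.getD_eq_default _ _ h, List.getD_eq_getElem?_getD]
    have hlen : (codes.take total).length = codes.length := by
      simp [List.length_take]; omega
    rw [List.getElem?_append_right (by omega)]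
    rw [List.getElem?_replicate]
    simp only [hlen]
    have : j - codes.length < total - codes.length := by omega
    simp [this]

-- B's slice of the flat buffer is pvRow
theorem pv_slice_row (codes : List Int) (total c a : Nat) (ha : a + c ≤ total) :
    ((PySem.List.slice codes none (some (total : Int)) ++
        List.replicate (total - (PySem.List.slice codes none (some (total : Int))).length) (0 : Int)).drop a).take c
      = pvRow codes c a := by
  set flat := PySem.List.slice codes none (some (total : Int)) ++
      List.replicate (total - (PySem.List.slice codes none (some (total : Int))).length) (0 : Int) with hflat
  have hflen : flat.length = total := by
    rw [hflat]
    simp [PySem.List.slice_to_natCast, List.length_take]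
  apply List.ext_getElem
  · simp [List.length_take, List.length_drop, hflen, pvRow]
    omega
  · intro i h1 h2
    have hi : i < c := by
      have h1' := h1
      simp [List.length_take, List.length_drop, hflen] at h1'
      omega
    rw [List.getElem_take, List.getElem_drop]
    have hrow : (pvRow codes c a)[i] = codes.getD (a + i) 0 := by
      simp [pvRow]
    rw [hrow]
    have : flat[a + i]'(by omega) = flat.getD (a + i) 0 := by
      rw [List.getD_eq_getElem _ _ (by omega)]
    rw [this, pv_flat_getD codes total (a + i) (by omega)]

-- ===== VERDICT (by name: the statement is the Claim_ definition above) =====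
theorem create_matrice_carre_spec : Claim_equal_create_matrice_carre := by
  intro col_size line_size codes _
  unfold Spec_create_matrice_carre
  rw [pv_A_eq]
  unfold create_matrice_carre_alt
  simp only
  rw [PySem.List.pyRange_one]
  have hrows : (max line_size 0 - 0).toNat = line_size.toNat := by omega
  rw [hrows]
  simp only [zero_add, List.map_map]
  refine List.map_congr_left (fun r hr => ?_)
  have hrR : r < line_size.toNat := List.mem_range.mp hr
  simp only [Function.comp_apply]
  have hc0 : max col_size 0 = ((col_size.toNat : Nat) : Int) := by omega
  have hl0 : max line_size 0 = ((line_size.toNat : Nat) : Int) := by omega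
  rw [hc0, hl0]
  have h1 : ((r : Int)) * (col_size.toNat : Int) = ((r * col_size.toNat : Nat) : Int) := by
    push_cast; ring
  have h2 : ((r : Int) + 1) * (col_size.toNat : Int) = ((r * col_size.toNat + col_size.toNat : Nat) : Int) := by
    push_cast; ring
  rw [h1, h2]
  have h3 : ((line_size.toNat : Int) * (col_size.toNat : Int)) = ((line_size.toNat * col_size.toNat : Nat) : Int) := by
    push_cast; ring
  rw [h3, PySem.List.slice_natCast]
  have h4 : r * col_size.toNat + col_size.toNat - r * col_size.toNat = col_size.toNat := by omega
  rw [h4]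
  exact (pv_slice_row codes (line_size.toNat * col_size.toNat) col_size.toNat (r * col_size.toNat)
    (by have h5 : r + 1 <= line_size.toNat := hrR
        calc r * col_size.toNat + col_size.toNat = (r + 1) * col_size.toNat := by rw [Nat.succ_mul]
          _ <= line_size.toNat * col_size.toNat := Nat.mul_le_mul_right _ h5)).symm
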